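-- pv_equiv track=rewrite | github.com/posl/comment_recommendation | script/split_gen/2_time/zh/246_D/3.py | solve
-- ===== SOURCE A (Python) =====
-- def solve(N):
--     # write code here
--     if N == 0:
--         return 0
--     if N == 1:
--         return 2
--     # 二分法
--     l, r = 0, N
--     while l < r:
--         mid = l + (r - l) // 2
--         if mid ** 3 + mid ** 2 * 3 + mid * 3 + 1 >= N:
--             r = mid
--         else:
--             l = mid + 1
--     return l
-- ===== SOURCE B (Python) =====
-- def solve(N):
--     # write code here
--     if N == 0:
--         return 0
--     if N == 1:
--         return 2
--     # linear upward scan for the smallest m with (m+1)**3 >= N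
--     m = 0
--     while (m + 1) ** 3 < N:
--         m += 1
--     return m
-- ===== Notes on version B (the rewrite author's own statement) =====
-- stated objective: alternative
-- what changed: the binary search over the interval is replaced by a forward linear scan that increments m until the cube of m+1 reaches N; the two explicit guards of A are kept
import Mathlib
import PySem

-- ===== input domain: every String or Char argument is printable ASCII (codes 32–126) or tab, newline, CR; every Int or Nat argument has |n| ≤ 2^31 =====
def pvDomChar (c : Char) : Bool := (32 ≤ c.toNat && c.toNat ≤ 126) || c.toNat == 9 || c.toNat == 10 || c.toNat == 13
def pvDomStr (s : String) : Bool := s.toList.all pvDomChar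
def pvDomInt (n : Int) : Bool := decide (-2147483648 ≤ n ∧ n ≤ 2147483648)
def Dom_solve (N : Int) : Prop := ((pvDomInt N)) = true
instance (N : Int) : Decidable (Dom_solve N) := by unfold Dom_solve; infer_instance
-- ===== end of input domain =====

-- B replaces A's binary search by a forward linear scan (alternative algorithm, not faster).

-- ===== PORT A =====
-- the while-loop of A: l, r shrink by bisection
def solveLoop (N l r : Int) : Int :=
  if _h : l < r then
    let mid := l + PySem.Int.floordiv (r - l) 2
    if mid ^ 3 + mid ^ 2 * 3 + mid * 3 + 1 ≥ N then
      solveLoop N l mid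
    else
      solveLoop N (mid + 1) r
  else l
termination_by (r - l).toNat
decreasing_by
  · rw [PySem.Int.floordiv_eq_ediv_of_pos (by omega)]
    have h2 := Int.ediv_add_emod (r - l) 2
    have h3 := Int.emod_nonneg (r - l) (by norm_num : (2:Int) ≠ 0)
    have h4 := Int.emod_lt_of_pos (r - l) (by norm_num : (0:Int) < 2)
    omega
  · rw [PySem.Int.floordiv_eq_ediv_of_pos (by omega)]
    have h2 := Int.ediv_add_emod (r - l) 2
    have h3 := Int.emod_nonneg (r - l) (by norm_num : (2:Int) ≠ 0)
    have h4 := Int.emod_lt_of_pos (r - l) (by norm_num : (0:Int) < 2)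
    omega

def solve (N : Int) : Int :=
  if N = 0 then 0
  else if N = 1 then 2
  else solveLoop N 0 N

-- ===== PORT B =====
-- the while-loop of B: increment m while (m+1)^3 < N
def scanLoop (N m : Int) : Int :=
  if (m + 1) ^ 3 < N then scanLoop N (m + 1) else m
termination_by (N - (m + 1) ^ 3).toNat
decreasing_by
  have hlt : (m + 1) ^ 3 < (m + 1 + 1) ^ 3 := by nlinarith [sq_nonneg (m + 1), sq_nonneg (m + 2), sq_nonneg (2 * m + 3)]
  generalize hA : (m + 1) ^ 3 = a at *
  generalize hB : (m + 1 + 1) ^ 3 = b at *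
  omega

def solve_alt (N : Int) : Int :=
  if N = 0 then 0
  else if N = 1 then 2
  else scanLoop N 0

-- ===== PRECONDITION & SPEC =====
def Spec_solve (N : Int) (out : Int) : Prop := out = solve_alt N
instance (N : Int) (out : Int) : Decidable (Spec_solve N out) := by unfold Spec_solve; infer_instance

-- ===== CLAIM (what is proved, stated in full; the proofs are below) =====
def Claim_equal_solve : Prop := ∀ (N : Int), Dom_solve N → Spec_solve N (solve N)

-- ===== LEMMAS AND PROOFS =====

theorem cube_mono {a b : Int} (h : a ≤ b) : a ^ 3 ≤ b ^ 3 := by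
  nlinarith [sq_nonneg (a + b), sq_nonneg (a - b), sq_nonneg a, sq_nonneg b]

theorem scan_stop {N m : Int} (h : ¬ (m + 1) ^ 3 < N) : scanLoop N m = m := by
  rw [scanLoop]; simp [h]

theorem scan_step {N m : Int} (h : (m + 1) ^ 3 < N) : scanLoop N m = scanLoop N (m + 1) := by
  rw [scanLoop]; simp [h]

-- the scan passes over any prefix on which the loop condition holds
theorem scan_skip (d : Nat) : ∀ (N l : Int),
    (∀ k : Int, l ≤ k → k < l + d → (k + 1) ^ 3 < N) →
    scanLoop N l = scanLoop N (l + d) := by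
  induction d with
  | zero => intro N l _; norm_num
  | succ d ih =>
      intro N l hk
      have h0 : (l + 1) ^ 3 < N := hk l le_rfl (by push_cast; omega)
      rw [scan_step h0, ih N (l + 1) (fun k hk1 hk2 => hk k (by omega) (by push_cast at hk2 ⊢; omega))]
      congr 1
      push_cast
      ring

-- binary search on [l, r] with (r+1)^3 ≥ N agrees with the scan from l
theorem bs_eq_scan (n : Nat) : ∀ (N l r : Int), (r - l).toNat = n → l ≤ r →
    (r + 1) ^ 3 ≥ N → solveLoop N l r = scanLoop N l := by
  induction n using Nat.strong_induction_on with
  | _ n ih =>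
    intro N l r hn hlr hr
    rw [solveLoop]
    by_cases hltr : l < r
    · simp only [hltr, dif_pos]
      have hd : PySem.Int.floordiv (r - l) 2 = (r - l) / 2 :=
        PySem.Int.floordiv_eq_ediv_of_pos (by omega)
      have h2 := Int.ediv_add_emod (r - l) 2
      have h3 := Int.emod_nonneg (r - l) (by norm_num : (2:Int) ≠ 0)
      have h4 := Int.emod_lt_of_pos (r - l) (by norm_num : (0:Int) < 2)
      set mid := l + PySem.Int.floordiv (r - l) 2 with hmid
      have hmidlo : l ≤ mid := by rw [hmid, hd]; omega
      have hmidhi : mid < r := by rw [hmid, hd]; omega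
      have hcond : (mid ^ 3 + mid ^ 2 * 3 + mid * 3 + 1 ≥ N) ↔ ((mid + 1) ^ 3 ≥ N) := by
        constructor <;> intro h <;> nlinarith [h]
      by_cases hc : mid ^ 3 + mid ^ 2 * 3 + mid * 3 + 1 ≥ N
      · simp only [hc, if_pos]
        exact ih (mid - l).toNat (by omega) N l mid (by omega) hmidlo (hcond.mp hc)
      · simp only [hc, if_neg, not_false_iff]
        have hmidlt : ¬ ((mid + 1) ^ 3 ≥ N) := fun h => hc (hcond.mpr h)
        have hrec : solveLoop N (mid + 1) r = scanLoop N (mid + 1) :=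
          ih (r - (mid + 1)).toNat (by omega) N (mid + 1) r (by omega) (by omega) hr
        rw [hrec]
        have hskip := scan_skip (mid + 1 - l).toNat N l (by
          intro k hk1 hk2
          have hkm : k ≤ mid := by
            have : ((mid + 1 - l).toNat : Int) = mid + 1 - l := by omega
            omega
          have := cube_mono (show k + 1 ≤ mid + 1 by omega)
          omega)
        rw [hskip]
        congr 1
        omega
    · simp only [hltr, dif_neg, not_false_iff]
      have hlr' : l = r := by omega
      rw [scan_stop (by subst hlr'; omega)]

theorem solve_spec : Claim_equal_solve := by
  unfold Claim_equal_solve Spec_solve solve solve_alt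
  intro N _
  by_cases h0 : N = 0
  · simp [h0]
  by_cases h1 : N = 1
  · simp [h1]
  simp only [h0, h1, if_neg, not_false_iff]
  by_cases hneg : N < 0
  · rw [solveLoop, scan_stop (by norm_num; omega)]
    simp [show ¬ ((0:Int) < N) by omega]
  · have hN2 : 2 ≤ N := by omega
    exact bs_eq_scan (N - 0).toNat N 0 N rfl (by omega) (by
      have h := le_self_pow₀ (show (1:Int) ≤ N + 1 by omega) (by norm_num : (3:ℕ) ≠ 0)
      linarith)
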